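-- pv_equiv track=rewrite | github.com/loniceraLeo/TlsProxy | TlsProxy/utils.py | is_valid_address
-- ===== SOURCE A (Python) =====
-- def is_valid_address(hostname: str, port: int) -> bool:
--     if port != 80 and port != 443:
--         return False
--     try:
--         for i in range(len(hostname)):
--             ascii_num = ord(hostname[i])
--             if hostname[i] == '.' or hostname[i] == '-' or \
--                 ascii_num in list(range(48, 58)) or \
--                     ascii_num in list(range(65, 91)) or \
--                         ascii_num in list(range(97, 123)):
--                 continue
--             else:
--                 return False
--     except:
--         return False
--     return True
-- ===== SOURCE B (Python) =====
-- _ALLOWED_CHARS = "ABCDEFGHIJKLMNOPQRSTUVWXYZabcdefghijklmnopqrstuvwxyz0123456789.-"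
--
-- def is_valid_address(hostname: str, port: int) -> bool:
--     if port != 80 and port != 443:
--         return False
--     # str.strip removes allowed characters from both ends inward; the residue is
--     # empty exactly when every character of hostname is allowed.
--     return hostname.strip(_ALLOWED_CHARS) == ""
-- ===== Notes on version B (the rewrite author's own statement) =====
-- stated objective: idiomatic
-- what changed: Replaces the explicit indexed per-character loop over ord-ranges (rebuilding three list(range(...)) per character) with a two-ended str.strip of the allowed characters and an emptiness test of the residue; no per-character loop appears in B.
import Mathlib
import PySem

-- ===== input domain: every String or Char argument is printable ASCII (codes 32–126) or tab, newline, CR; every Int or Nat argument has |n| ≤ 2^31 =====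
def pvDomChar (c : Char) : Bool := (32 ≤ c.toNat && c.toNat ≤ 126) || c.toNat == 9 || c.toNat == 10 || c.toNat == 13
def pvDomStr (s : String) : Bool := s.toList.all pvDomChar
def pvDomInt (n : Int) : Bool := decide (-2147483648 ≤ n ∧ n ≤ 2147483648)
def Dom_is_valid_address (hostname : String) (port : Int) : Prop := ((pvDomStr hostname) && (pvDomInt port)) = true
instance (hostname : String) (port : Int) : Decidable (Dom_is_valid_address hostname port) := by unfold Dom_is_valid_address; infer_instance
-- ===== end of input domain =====

-- B replaces A's indexed per-character ord-range loop with a two-ended str.strip of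
-- the allowed characters and an emptiness test of the residue (objective: idiomatic).

-- ===== PORT A =====
-- the for-loop over range(len(hostname)) indexing hostname[i]: structural recursion
-- over the character list; the try/except is unreachable (indexing is always in range)
def pvALoop : List Char → Bool
  | [] => true
  | c :: rest =>
    if c = '.' ∨ c = '-' ∨ (48 ≤ c.toNat ∧ c.toNat < 58) ∨
        (65 ≤ c.toNat ∧ c.toNat < 91) ∨ (97 ≤ c.toNat ∧ c.toNat < 123) then
      pvALoop rest
    else
      false

def is_valid_address (hostname : String) (port : Int) : Bool :=
  if port ≠ 80 ∧ port ≠ 443 then false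
  else pvALoop hostname.toList

-- ===== PORT B =====
def pvAllowedChars : String :=
  "ABCDEFGHIJKLMNOPQRSTUVWXYZabcdefghijklmnopqrstuvwxyz0123456789.-"

def is_valid_address_alt (hostname : String) (port : Int) : Bool :=
  if port ≠ 80 ∧ port ≠ 443 then false
  else PySem.Str.stripChars hostname pvAllowedChars == ""

-- ===== PRECONDITION & SPEC =====
def Spec_is_valid_address (hostname : String) (port : Int) (out : Bool) : Prop := out = is_valid_address_alt hostname port
instance (hostname : String) (port : Int) (out : Bool) : Decidable (Spec_is_valid_address hostname port out) := by unfold Spec_is_valid_address; infer_instance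

-- ===== CLAIM (what is proved, stated in full; the proofs are below) =====
def Claim_equal_is_valid_address : Prop := ∀ (hostname : String) (port : Int), Dom_is_valid_address hostname port → Spec_is_valid_address hostname port (is_valid_address hostname port)

-- ===== LEMMAS AND PROOFS =====

theorem char_eq_iff_toNat (c x : Char) : c = x ↔ c.toNat = x.toNat :=
  ⟨fun h => by rw [h], fun h => Char.ext (UInt32.toNat_inj.mp h)⟩

-- membership in the allowed string is exactly A's per-character condition
theorem mem_allowed_iff (c : Char) :
    c ∈ pvAllowedChars.toList ↔ (c = '.' ∨ c = '-' ∨ (48 ≤ c.toNat ∧ c.toNat < 58) ∨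
      (65 ≤ c.toNat ∧ c.toNat < 91) ∨ (97 ≤ c.toNat ∧ c.toNat < 123)) := by
  simp [pvAllowedChars, char_eq_iff_toNat]
  omega

-- A's per-character loop is the 'every character allowed' predicate
theorem pvALoop_eq_all (cs : List Char) :
    pvALoop cs = true ↔ ∀ c ∈ cs, c ∈ pvAllowedChars.toList := by
  induction cs with
  | nil => simp [pvALoop]
  | cons c rest ih =>
    by_cases h : c = '.' ∨ c = '-' ∨ (48 ≤ c.toNat ∧ c.toNat < 58) ∨
        (65 ≤ c.toNat ∧ c.toNat < 91) ∨ (97 ≤ c.toNat ∧ c.toNat < 123)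
    · simp only [pvALoop, if_pos h, ih, List.mem_cons]
      constructor
      · rintro hall d (rfl | hd)
        · exact (mem_allowed_iff d).mpr h
        · exact hall d hd
      · intro hall d hd; exact hall d (Or.inr hd)
    · simp only [pvALoop, if_neg h]
      constructor
      · intro hf; cases hf
      · intro hall
        exact absurd ((mem_allowed_iff c).mp (hall c (by simp))) h

-- a two-ended strip leaves nothing exactly when every character is in the strip set
theorem stripChars_eq_nil_iff (cs al : List Char) :
    PySem.Chars.stripChars cs al = [] ↔ ∀ c ∈ cs, c ∈ al := by
  unfold PySem.Chars.stripChars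
  simp only [List.reverse_eq_nil_iff, List.dropWhile_eq_nil_iff, List.mem_reverse,
    List.contains_eq_mem, decide_eq_true_eq]
  constructor
  · intro h c hc
    rcases List.mem_append.mp
        (by rw [List.takeWhile_append_dropWhile]; exact hc :
          c ∈ cs.takeWhile (fun c => decide (c ∈ al)) ++
            cs.dropWhile (fun c => decide (c ∈ al))) with h1 | h2
    · simpa using List.mem_takeWhile_imp h1
    · exact h c h2
  · intro h c hc
    exact h c ((List.dropWhile_sublist _).mem hc)

-- ===== VERDICT (by name: the statement is the Claim_ definition above) =====
theorem is_valid_address_spec : Claim_equal_is_valid_address := by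
  intro hostname port _
  unfold Spec_is_valid_address is_valid_address is_valid_address_alt
  by_cases hp : port ≠ 80 ∧ port ≠ 443
  · simp [hp]
  · simp only [if_neg hp]
    rw [Bool.eq_iff_iff, beq_iff_eq, pvALoop_eq_all, ← String.toList_inj,
      PySem.Str.toList_stripChars,
      show ("" : String).toList = [] from rfl, stripChars_eq_nil_iff]
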